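-- pv_equiv track=rewrite | github.com/Bench-amblee/vscode | return_numbers.py | list_return
-- ===== SOURCE A (Python) =====
-- def list_return(nums):
--     correct_list = []
--     for num in nums:
--
--         if num > 500:
--             break
--
--         if num > 150:
--             continue
--
--         if num % 5 == 0:
--             correct_list.append(num)
--
--     return correct_list
-- ===== SOURCE B (Python) =====
-- def list_return(nums):
--     # stage 1: locate the cut index k = position of the first element > 500
--     k = 0
--     n = len(nums)
--     while k < n and nums[k] <= 500:
--         k += 1
--     # stage 2: walk the prefix nums[:k] backwards, collect matches, then reverse once
--     out = []
--     i = k - 1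
--     while i >= 0:
--         x = nums[i]
--         if x <= 150 and x % 5 == 0:
--             out.append(x)
--         i -= 1
--     out.reverse()
--     return out
-- ===== Notes on version B (the rewrite author's own statement) =====
-- stated objective: alternative
-- what changed: Replaced the single fused break/continue/append loop by an index-based two-phase algorithm: a while-loop first searches for the cut index of the first element > 500, then a second while-loop walks that prefix backwards by index collecting elements <= 150 divisible by 5, and a final reverse restores the order.
import Mathlib
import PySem

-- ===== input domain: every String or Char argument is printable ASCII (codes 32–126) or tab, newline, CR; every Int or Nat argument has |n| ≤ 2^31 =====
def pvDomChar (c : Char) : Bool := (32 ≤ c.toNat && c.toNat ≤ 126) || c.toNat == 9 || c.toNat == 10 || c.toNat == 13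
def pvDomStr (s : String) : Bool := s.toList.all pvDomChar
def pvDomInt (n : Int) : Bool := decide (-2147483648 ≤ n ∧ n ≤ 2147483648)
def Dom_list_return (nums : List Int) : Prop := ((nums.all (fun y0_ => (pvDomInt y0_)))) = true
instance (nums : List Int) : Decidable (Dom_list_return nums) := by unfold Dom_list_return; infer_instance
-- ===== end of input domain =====

-- B replaces A's fused break/continue loop by an index-based two-phase algorithm (find the cut index, then a backwards index walk + final reverse) — alternative decomposition, same cost; return value only.


-- ===== PORT A =====
-- A's loop: break on num > 500, continue on num > 150, append multiples of 5.
def listReturnLoop (nums : List Int) (acc : List Int) : List Int :=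
  match nums with
  | [] => acc
  | num :: rest =>
    if num > 500 then acc
    else if num > 150 then listReturnLoop rest acc
    else if PySem.Int.mod num 5 = 0 then listReturnLoop rest (acc ++ [num])
    else listReturnLoop rest acc

def list_return (nums : List Int) : List Int := listReturnLoop nums []

-- ===== PORT B =====
-- stage 1: `while k < n and nums[k] <= 500: k += 1` (k counts up, terminates by n - k)
def cutIndex (nums : List Int) (k : Nat) : Nat :=
  if h : k < nums.length ∧ nums.getD k 0 ≤ 500 then cutIndex nums (k + 1) else k
termination_by nums.length - k
decreasing_by omega

-- stage 2: `while i >= 0: x = nums[i]; if …: out.append(x); i -= 1`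
-- (the Nat argument j stands for i + 1, so j = 0 is the exit i = -1; the index i = j - 1
--  is always in range 0 ≤ i < k ≤ len(nums), so `nums[i]` is exactly `nums.getD (j-1) 0`)
def backWalk (nums : List Int) (out : List Int) : Nat → List Int
  | 0 => out
  | j + 1 =>
    let x := nums.getD j 0
    backWalk nums (if x ≤ 150 ∧ PySem.Int.mod x 5 = 0 then out ++ [x] else out) j

def list_return_alt (nums : List Int) : List Int :=
  (backWalk nums [] (cutIndex nums 0)).reverse

-- ===== PRECONDITION & SPEC =====
def Spec_list_return (nums : List Int) (out : List Int) : Prop := out = list_return_alt nums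
instance (nums : List Int) (out : List Int) : Decidable (Spec_list_return nums out) := by unfold Spec_list_return; infer_instance

-- ===== CLAIM (what is proved, stated in full; the proofs are below) =====
def Claim_equal_list_return : Prop := ∀ (nums : List Int), Dom_list_return nums → Spec_list_return nums (list_return nums)

-- ===== LEMMAS AND PROOFS =====
-- the shared characterisation: keep-predicate on the ≤ 500 prefix
def keepP (x : Int) : Bool := decide (x ≤ 150) && decide (PySem.Int.mod x 5 = 0)

theorem listReturnLoop_acc (nums : List Int) :
    ∀ acc : List Int,
      listReturnLoop nums acc = acc ++ (nums.takeWhile (fun x => decide (x ≤ 500))).filter keepP := by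
  induction nums with
  | nil => intro acc; simp [listReturnLoop]
  | cons num rest ih =>
    intro acc
    simp only [listReturnLoop, List.takeWhile]
    by_cases h1 : num > 500
    · simp [h1, show ¬ num ≤ 500 by omega]
    · have h1' : num ≤ 500 := by omega
      by_cases h2 : num > 150
      · have h2' : ¬ num ≤ 150 := by omega
        simp [h1, h1', h2, h2', ih, keepP]
      · have h2' : num ≤ 150 := by omega
        by_cases h3 : (5:Int) ∣ num
        · simp [h1, h1', h2, h2', h3, ih, keepP]
        · simp [h1, h1', h2, h2', h3, ih, keepP]

theorem cutIndex_eq (nums : List Int) : ∀ k : Nat,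
    cutIndex nums k = k + ((nums.drop k).takeWhile (fun x => decide (x ≤ 500))).length := by
  intro k
  induction hn : nums.length - k using Nat.strong_induction_on generalizing k with
  | _ n ih =>
    rw [cutIndex]
    by_cases h : k < nums.length ∧ nums.getD k 0 ≤ 500
    · obtain ⟨hk, hle⟩ := h
      have hget : nums.getD k 0 = nums[k] := List.getD_eq_getElem nums 0 hk
      have hdrop : nums.drop k = nums[k] :: nums.drop (k + 1) :=
        List.drop_eq_getElem_cons hk
      rw [dif_pos ⟨hk, hle⟩, ih (nums.length - (k + 1)) (by omega) (k + 1) rfl, hdrop]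
      simp only [List.takeWhile]
      rw [hget] at hle
      simp [hle]
      omega
    · rw [dif_neg h]
      by_cases hk : k < nums.length
      · have hle : ¬ nums.getD k 0 ≤ 500 := by tauto
        have hget : nums.getD k 0 = nums[k] := List.getD_eq_getElem nums 0 hk
        have hdrop : nums.drop k = nums[k] :: nums.drop (k + 1) :=
          List.drop_eq_getElem_cons hk
        rw [hdrop]
        simp only [List.takeWhile]
        rw [hget] at hle
        simp [hle]
      · have : nums.drop k = [] := List.drop_eq_nil_of_le (by omega)
        simp [this]

theorem backWalk_eq (nums : List Int) : ∀ (j : Nat), j ≤ nums.length → ∀ out : List Int,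
    backWalk nums out j = out ++ ((nums.take j).filter keepP).reverse := by
  intro j
  induction j with
  | zero => intro _ out; simp [backWalk]
  | succ j ih =>
    intro hj out
    have hjlt : j < nums.length := by omega
    have hget : nums.getD j 0 = nums[j] := List.getD_eq_getElem nums 0 hjlt
    have htake : nums.take (j + 1) = nums.take j ++ [nums[j]] :=
      List.take_succ_eq_append_getElem hjlt
    simp only [backWalk, hget, htake, List.filter_append, List.reverse_append]
    by_cases h : nums[j] ≤ 150 ∧ PySem.Int.mod nums[j] 5 = 0
    · have : keepP nums[j] = true := by
        simp [keepP, h.1, (PySem.Int.mod_eq_zero_iff_dvd _ _).mp h.2]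
      rw [if_pos h, ih (by omega)]
      simp [List.filter, this]
    · have : keepP nums[j] = false := by
        simp only [keepP, Bool.and_eq_false_iff, decide_eq_false_iff_not]
        by_cases h1 : nums[j] ≤ 150
        · right; intro hc; exact h ⟨h1, hc⟩
        · left; exact h1
      rw [if_neg h, ih (by omega)]
      simp [List.filter, this]

theorem alt_eq (nums : List Int) :
    list_return_alt nums = (nums.takeWhile (fun x => decide (x ≤ 500))).filter keepP := by
  unfold list_return_alt
  have hpre : nums.takeWhile (fun x => decide (x ≤ 500)) <+: nums := List.takeWhile_prefix _
  have hlen : (nums.takeWhile (fun x => decide (x ≤ 500))).length ≤ nums.length :=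
    hpre.length_le
  have hcut : cutIndex nums 0 = (nums.takeWhile (fun x => decide (x ≤ 500))).length := by
    simpa using cutIndex_eq nums 0
  have htake : nums.take (nums.takeWhile (fun x => decide (x ≤ 500))).length
      = nums.takeWhile (fun x => decide (x ≤ 500)) := (List.prefix_iff_eq_take.mp hpre).symm
  rw [hcut, backWalk_eq nums _ hlen, htake]
  simp

-- ===== VERDICT (by name: the statement is the Claim_ definition above) =====
theorem list_return_spec : Claim_equal_list_return := by
  intro nums _
  unfold Spec_list_return list_return
  rw [alt_eq]
  simpa using listReturnLoop_acc nums []
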